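-- pv_equiv track=rewrite | github.com/msaxler/lernapp | scripts/data-fetch/fetch_bahnhof.py | suche_bahnhof
-- ===== SOURCE A (Python) =====
-- def suche_bahnhof(stadtname, header, bahnhoefe):
--     """
--     Sucht den wichtigsten Bahnhof einer Stadt im DB-Verzeichnis.
--     Gibt Kategorie und Bahnhofsname zurück.
--     """
--     # Spaltenindizes ermitteln
--     try:
--         idx_name = header.index("Bahnhof") if "Bahnhof" in header else 1
--         idx_kat  = header.index("Kat") if "Kat" in header else 3
--     except ValueError:
--         # Fallback: typische Spaltenposition
--         idx_name, idx_kat = 1, 3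
--
--     treffer = []
--     stadtname_lower = stadtname.lower()
--
--     for felder in bahnhoefe:
--         if len(felder) <= max(idx_name, idx_kat):
--             continue
--         name = felder[idx_name].strip().lower()
--         # Matching: Stadtname im Bahnhofsnamen
--         if stadtname_lower in name or name.startswith(stadtname_lower[:6].lower()):
--             try:
--                 kat = int(felder[idx_kat].strip())
--                 treffer.append((kat, felder[idx_name].strip()))
--             except (ValueError, IndexError):
--                 pass
--
--     if not treffer:
--         return None, None
--
--     # Bester Treffer: niedrigste Kategorie (= größter Bahnhof)
--     treffer.sort(key=lambda x: x[0])
--     return treffer[0]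
-- ===== SOURCE B (Python) =====
-- def _kandidat(felder, idx_name, idx_kat, key, praefix):
--     """One row's candidate (kategorie, name), or None if it does not match."""
--     if len(felder) <= max(idx_name, idx_kat):
--         return None
--     name = felder[idx_name].strip()
--     low = name.lower()
--     if key not in low and not low.startswith(praefix):
--         return None
--     try:
--         return int(felder[idx_kat].strip()), name
--     except ValueError:
--         return None
--
--
-- def suche_bahnhof(stadtname, header, bahnhoefe):
--     """Single pass keeping only the best (lowest-category) match; no list, no sort."""
--     idx_name = header.index("Bahnhof") if "Bahnhof" in header else 1
--     idx_kat = header.index("Kat") if "Kat" in header else 3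
--     key = stadtname.lower()
--     praefix = key[:6]
--     best = None
--     for felder in bahnhoefe:
--         kandidat = _kandidat(felder, idx_name, idx_kat, key, praefix)
--         if kandidat is not None and (best is None or kandidat[0] < best[0]):
--             best = kandidat
--     return best if best is not None else (None, None)
-- ===== Notes on version B (the rewrite author's own statement) =====
-- stated objective: simpler
-- what changed: B replaces A's collect-all-matches-then-stable-sort with a single pass that keeps only the current best (lowest-category, strict < so the first match wins ties) and factors the per-row matching/parsing into a helper, dropping the treffer list and the sort.
import Mathlib
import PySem

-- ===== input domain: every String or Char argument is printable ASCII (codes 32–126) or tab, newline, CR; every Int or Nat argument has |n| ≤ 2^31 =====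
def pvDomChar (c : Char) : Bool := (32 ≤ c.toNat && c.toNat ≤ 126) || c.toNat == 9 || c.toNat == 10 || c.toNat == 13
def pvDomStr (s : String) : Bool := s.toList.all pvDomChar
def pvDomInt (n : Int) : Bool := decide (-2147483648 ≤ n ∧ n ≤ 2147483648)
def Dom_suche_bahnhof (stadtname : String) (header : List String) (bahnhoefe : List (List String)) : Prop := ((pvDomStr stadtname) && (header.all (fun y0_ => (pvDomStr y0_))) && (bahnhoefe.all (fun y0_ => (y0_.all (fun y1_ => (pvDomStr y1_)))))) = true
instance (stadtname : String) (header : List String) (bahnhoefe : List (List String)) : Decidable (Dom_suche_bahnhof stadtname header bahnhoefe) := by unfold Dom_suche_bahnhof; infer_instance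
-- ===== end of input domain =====

-- B replaces A's collect-then-stable-sort with a single best-tracking pass (strict < keeps the first match on ties); equivalence of return values is proved unconditionally.

-- ===== PORT A =====
-- Literal port of A. The `try/except ValueError` around header.index is dead code (index is
-- guarded by `in`), so it does not appear; the name lookup felder[idx_name] is in range by the
-- preceding length check, so `.getD ""` is never the taken branch; int() → PySem.Int.ofStr?,
-- whose `none` is exactly the caught ValueError.
def suche_bahnhof (stadtname : String) (header : List String) (bahnhoefe : List (List String)) : Option Int × Option String :=
  let idx_name : Int := if "Bahnhof" ∈ header then (((PySem.List.index? header "Bahnhof").getD 0 : Nat) : Int) else 1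
  let idx_kat : Int := if "Kat" ∈ header then (((PySem.List.index? header "Kat").getD 0 : Nat) : Int) else 3
  let stadtname_lower := PySem.Str.lower stadtname
  let treffer : List (Int × String) := bahnhoefe.foldl (fun treffer felder =>
    if (felder.length : Int) ≤ max idx_name idx_kat then treffer
    else
      let name := PySem.Str.lower (PySem.Str.strip ((PySem.List.pyGet? felder idx_name).getD ""))
      if PySem.Str.isIn stadtname_lower name ||
         PySem.Str.startswith name (PySem.Str.lower (PySem.Str.slice stadtname_lower none (some 6))) then
        match PySem.Int.ofStr? (PySem.Str.strip ((PySem.List.pyGet? felder idx_kat).getD "")) with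
        | some kat => treffer ++ [(kat, PySem.Str.strip ((PySem.List.pyGet? felder idx_name).getD ""))]
        | none => treffer
      else treffer) []
  if treffer = [] then (none, none)
  else
    match PySem.List.sorted treffer (fun x => x.1) with
    | [] => (none, none)  -- unreachable: treffer ≠ []
    | t :: _ => (some t.1, some t.2)

-- ===== PORT B =====
-- Port of Source B's helper _kandidat: one row's candidate, or none.
def pvKandidat (felder : List String) (idx_name idx_kat : Int) (key praefix : String) : Option (Int × String) :=
  if (felder.length : Int) ≤ max idx_name idx_kat then none
  else
    let name := PySem.Str.strip ((PySem.List.pyGet? felder idx_name).getD "")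
    let low := PySem.Str.lower name
    if !(PySem.Str.isIn key low) && !(PySem.Str.startswith low praefix) then none
    else (PySem.Int.ofStr? (PySem.Str.strip ((PySem.List.pyGet? felder idx_kat).getD ""))).map (fun kat => (kat, name))

def suche_bahnhof_alt (stadtname : String) (header : List String) (bahnhoefe : List (List String)) : Option Int × Option String :=
  let idx_name : Int := if "Bahnhof" ∈ header then (((PySem.List.index? header "Bahnhof").getD 0 : Nat) : Int) else 1
  let idx_kat : Int := if "Kat" ∈ header then (((PySem.List.index? header "Kat").getD 0 : Nat) : Int) else 3
  let key := PySem.Str.lower stadtname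
  let praefix := PySem.Str.slice key none (some 6)
  let best : Option (Int × String) := bahnhoefe.foldl (fun best felder =>
    match pvKandidat felder idx_name idx_kat key praefix with
    | none => best
    | some kandidat =>
      match best with
      | none => some kandidat
      | some m => if kandidat.1 < m.1 then some kandidat else some m) none
  match best with
  | none => (none, none)
  | some m => (some m.1, some m.2)

-- ===== PRECONDITION & SPEC =====
def Spec_suche_bahnhof (stadtname : String) (header : List String) (bahnhoefe : List (List String)) (out : Option Int × Option String) : Prop := out = suche_bahnhof_alt stadtname header bahnhoefe
instance (stadtname : String) (header : List String) (bahnhoefe : List (List String)) (out : Option Int × Option String) : Decidable (Spec_suche_bahnhof stadtname header bahnhoefe out) := by unfold Spec_suche_bahnhof; infer_instance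

-- ===== CLAIM (what is proved, stated in full; the proofs are below) =====
def Claim_equal_suche_bahnhof : Prop := ∀ (stadtname : String) (header : List String) (bahnhoefe : List (List String)), Dom_suche_bahnhof stadtname header bahnhoefe → Spec_suche_bahnhof stadtname header bahnhoefe (suche_bahnhof stadtname header bahnhoefe)

-- ===== LEMMAS AND PROOFS =====

-- B's best-update step, named for the proofs.
def pvUpd (best : Option (Int × String)) (c : Int × String) : Option (Int × String) :=
  match best with
  | none => some c
  | some m => if c.1 < m.1 then some c else some m

theorem char_le_iff (c d : Char) : c ≤ d ↔ c.toNat ≤ d.toNat := by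
  rw [Char.le_def, UInt32.le_iff_toNat_le]; rfl

theorem lowerChar_idem (c : Char) : PySem.Chars.lowerChar (PySem.Chars.lowerChar c) = PySem.Chars.lowerChar c := by
  unfold PySem.Chars.lowerChar PySem.Chars.isupper
  by_cases h : ('A' ≤ c ∧ c ≤ 'Z')
  · obtain ⟨h1, h2⟩ := h
    have h1n : 65 ≤ c.toNat := (char_le_iff _ _).1 h1
    have h2n : c.toNat ≤ 90 := (char_le_iff _ _).1 h2
    have hval : (c.toNat + 32).isValidChar := Or.inl (by omega)
    have ht : (Char.ofNat (c.toNat + 32)).toNat = c.toNat + 32 := by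
      rw [Char.toNat_ofNat, if_pos hval]
    have hd1 : decide ('A' ≤ c) = true := decide_eq_true h1
    have hd2 : decide (c ≤ 'Z') = true := decide_eq_true h2
    rw [hd1, hd2]
    simp only [Bool.and_self, if_pos]
    have hnot : (decide ('A' ≤ Char.ofNat (c.toNat + 32)) && decide (Char.ofNat (c.toNat + 32) ≤ 'Z')) = false := by
      have : ¬ (Char.ofNat (c.toNat + 32) ≤ 'Z') := by
        rw [char_le_iff, ht]; show ¬ _ ≤ 90; omega
      simp [this]
    rw [hnot]; simp
  · have hnot : (decide ('A' ≤ c) && decide (c ≤ 'Z')) = false := by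
      rcases not_and_or.1 h with h' | h' <;> simp [h']
    rw [hnot]; simp [hnot]

theorem lower_idem (l : List Char) : PySem.Chars.lower (PySem.Chars.lower l) = PySem.Chars.lower l := by
  unfold PySem.Chars.lower
  rw [List.map_map]
  exact List.map_congr_left (fun c _ => lowerChar_idem c)

-- A's prefix expression `stadtname_lower[:6].lower()` equals B's `key[:6]` (lower is idempotent).
theorem prefix_eq (s : String) :
    PySem.Str.lower (PySem.Str.slice (PySem.Str.lower s) none (some 6)) =
    PySem.Str.slice (PySem.Str.lower s) none (some 6) := by
  have h : (PySem.Str.lower (PySem.Str.slice (PySem.Str.lower s) none (some 6))).toList =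
      (PySem.Str.slice (PySem.Str.lower s) none (some 6)).toList := by
    rw [PySem.Str.toList_lower, PySem.Str.toList_slice, PySem.Str.toList_lower]
    rw [PySem.Chars.slice_eq_listSlice, PySem.List.slice_to _ (by norm_num : (0:Int) ≤ 6)]
    unfold PySem.Chars.lower
    rw [← List.map_take]
    exact lower_idem _
  calc PySem.Str.lower (PySem.Str.slice (PySem.Str.lower s) none (some 6))
      = String.ofList (PySem.Str.lower (PySem.Str.slice (PySem.Str.lower s) none (some 6))).toList := by
        rw [String.ofList_toList]
    _ = String.ofList (PySem.Str.slice (PySem.Str.lower s) none (some 6)).toList := by rw [h]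
    _ = PySem.Str.slice (PySem.Str.lower s) none (some 6) := by rw [String.ofList_toList]

theorem branch_eq (b1 b2 : Bool) (k? : Option Int) (nm : String) (acc : List (Int × String)) :
    (if b1 || b2 then
       match k? with
       | some kat => acc ++ [(kat, nm)]
       | none => acc
     else acc) =
    acc ++ (if !b1 && !b2 then none else k?.map (fun kat => (kat, nm))).toList := by
  cases b1 <;> cases b2 <;> cases k? <;> simp

-- A's loop body appends exactly the row candidate pvKandidat computes.
set_option maxHeartbeats 1000000 in
theorem bodyA_eq (idx_name idx_kat : Int) (key praefix : String) (acc : List (Int × String)) (felder : List String) :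
    (if (felder.length : Int) ≤ max idx_name idx_kat then acc
     else
       let name := PySem.Str.lower (PySem.Str.strip ((PySem.List.pyGet? felder idx_name).getD ""))
       if PySem.Str.isIn key name || PySem.Str.startswith name praefix then
         match PySem.Int.ofStr? (PySem.Str.strip ((PySem.List.pyGet? felder idx_kat).getD "")) with
         | some kat => acc ++ [(kat, PySem.Str.strip ((PySem.List.pyGet? felder idx_name).getD ""))]
         | none => acc
       else acc) =
    acc ++ (pvKandidat felder idx_name idx_kat key praefix).toList := by
  unfold pvKandidat
  split
  · simp
  · exact branch_eq
      (PySem.Str.isIn key (PySem.Str.lower (PySem.Str.strip ((PySem.List.pyGet? felder idx_name).getD ""))))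
      (PySem.Str.startswith (PySem.Str.lower (PySem.Str.strip ((PySem.List.pyGet? felder idx_name).getD ""))) praefix)
      (PySem.Int.ofStr? (PySem.Str.strip ((PySem.List.pyGet? felder idx_kat).getD "")))
      (PySem.Str.strip ((PySem.List.pyGet? felder idx_name).getD "")) acc

-- A list-append fold over optional row results is a filterMap.
theorem foldl_opt_append {α β : Type} (g : α → Option β) (l : List α) (acc : List β) :
    l.foldl (fun acc x => acc ++ (g x).toList) acc = acc ++ l.filterMap g := by
  induction l generalizing acc with
  | nil => simp
  | cons x t ih =>
    simp only [List.foldl_cons, List.filterMap_cons]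
    cases h : g x <;> simp [ih]

-- B's fold over rows equals the best-fold over the candidate stream.
theorem foldl_opt_best {α β : Type} (g : α → Option β) (upd : Option β → β → Option β) (l : List α) (init : Option β) :
    l.foldl (fun b x => match g x with | none => b | some c => upd b c) init =
    (l.filterMap g).foldl upd init := by
  induction l generalizing init with
  | nil => rfl
  | cons x t ih =>
    simp only [List.foldl_cons, List.filterMap_cons]
    cases h : g x <;> simp [ih]

theorem head?_insertBy (p : (Int × String) → (Int × String) → Bool) (x : Int × String) (ys : List (Int × String)) :
    (PySem.List.insertBy p x ys).head? =
      some (match ys with | [] => x | y :: _ => if p x y then x else y) := by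
  cases ys with
  | nil => rfl
  | cons y t =>
    unfold PySem.List.insertBy
    split <;> simp_all

-- Head of the insertion-sort fold is the strict-< best-so-far fold.
theorem head?_insertSort (l : List (Int × String)) (acc : List (Int × String)) :
    (l.foldl (fun acc x => PySem.List.insertBy (fun a b => decide (a.1 < b.1)) x acc) acc).head? =
    l.foldl pvUpd acc.head? := by
  induction l generalizing acc with
  | nil => rfl
  | cons x t ih =>
    simp only [List.foldl_cons]
    rw [ih]
    congr 1
    rw [head?_insertBy]
    cases acc with
    | nil => rfl
    | cons y ys =>
      simp only [List.head?_cons, pvUpd]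
      by_cases h : x.1 < y.1 <;> simp [h]

theorem head?_sorted (l : List (Int × String)) :
    (PySem.List.sorted l (fun x => x.1)).head? = l.foldl pvUpd none := by
  rw [PySem.List.sorted_eq_foldl_insertBy]
  exact head?_insertSort l []

-- ===== VERDICT (by name: the statement is the Claim_ definition above) =====
theorem suche_bahnhof_spec : Claim_equal_suche_bahnhof := by
  intro stadtname header bahnhoefe _hdom
  unfold Spec_suche_bahnhof suche_bahnhof suche_bahnhof_alt
  simp only []
  rw [prefix_eq]
  set idx_name : Int := if "Bahnhof" ∈ header then (((PySem.List.index? header "Bahnhof").getD 0 : Nat) : Int) else 1 with hidxn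
  set idx_kat : Int := if "Kat" ∈ header then (((PySem.List.index? header "Kat").getD 0 : Nat) : Int) else 3 with hidxk
  set key := PySem.Str.lower stadtname with hkey
  set praefix := PySem.Str.slice key none (some 6) with hpraefix
  have hA : (bahnhoefe.foldl (fun treffer felder =>
      if (felder.length : Int) ≤ max idx_name idx_kat then treffer
      else
        let name := PySem.Str.lower (PySem.Str.strip ((PySem.List.pyGet? felder idx_name).getD ""))
        if PySem.Str.isIn key name || PySem.Str.startswith name praefix then
          match PySem.Int.ofStr? (PySem.Str.strip ((PySem.List.pyGet? felder idx_kat).getD "")) with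
          | some kat => treffer ++ [(kat, PySem.Str.strip ((PySem.List.pyGet? felder idx_name).getD ""))]
          | none => treffer
        else treffer) []) = bahnhoefe.filterMap (fun felder => pvKandidat felder idx_name idx_kat key praefix) := by
    have : ∀ acc, (bahnhoefe.foldl (fun treffer felder =>
        if (felder.length : Int) ≤ max idx_name idx_kat then treffer
        else
          let name := PySem.Str.lower (PySem.Str.strip ((PySem.List.pyGet? felder idx_name).getD ""))
          if PySem.Str.isIn key name || PySem.Str.startswith name praefix then
            match PySem.Int.ofStr? (PySem.Str.strip ((PySem.List.pyGet? felder idx_kat).getD "")) with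
            | some kat => treffer ++ [(kat, PySem.Str.strip ((PySem.List.pyGet? felder idx_name).getD ""))]
            | none => treffer
          else treffer) acc) = acc ++ bahnhoefe.filterMap (fun felder => pvKandidat felder idx_name idx_kat key praefix) := by
      intro acc
      rw [← foldl_opt_append (fun felder => pvKandidat felder idx_name idx_kat key praefix) bahnhoefe acc]
      congr 1
      funext a f
      exact bodyA_eq idx_name idx_kat key praefix a f
    simpa using this []
  have hB : (bahnhoefe.foldl (fun best felder =>
      match pvKandidat felder idx_name idx_kat key praefix with
      | none => best
      | some kandidat =>
        match best with
        | none => some kandidat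
        | some m => if kandidat.1 < m.1 then some kandidat else some m) none) =
      (bahnhoefe.filterMap (fun felder => pvKandidat felder idx_name idx_kat key praefix)).foldl pvUpd none := by
    rw [← foldl_opt_best (fun felder => pvKandidat felder idx_name idx_kat key praefix) pvUpd bahnhoefe none]
    congr 1
    funext b f
    cases pvKandidat f idx_name idx_kat key praefix with
    | none => rfl
    | some c => cases b <;> rfl
  rw [hA, hB]
  set treffer := bahnhoefe.filterMap (fun felder => pvKandidat felder idx_name idx_kat key praefix) with htreffer
  by_cases hnil : treffer = []
  · rw [if_pos hnil, hnil]
    rfl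
  · rw [if_neg hnil]
    have hs := head?_sorted treffer
    cases hsort : PySem.List.sorted treffer (fun x => x.1) with
    | nil => exact absurd ((PySem.List.sorted_eq_nil_iff treffer (fun x => x.1) false).1 hsort) hnil
    | cons t rest =>
      rw [hsort] at hs
      simp only [List.head?_cons] at hs
      rw [← hs]
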